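-- pv_equiv track=rewrite | github.com/Jobo16/Jobo16.github.io | scripts/generate_manifest.py | split_path_and_suffix
-- ===== SOURCE A (Python) =====
-- def split_path_and_suffix(url: str) -> tuple[str, str]:
--     query_idx = url.find("?")
--     hash_idx = url.find("#")
--     indices = [i for i in (query_idx, hash_idx) if i != -1]
--     if not indices:
--         return url, ""
--
--     cut = min(indices)
--     return url[:cut], url[cut:]
-- ===== SOURCE B (Python) =====
-- def split_path_and_suffix(url: str) -> tuple[str, str]:
--     for i, ch in enumerate(url):
--         if ch == "?" or ch == "#":
--             return url[:i], url[i:]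
--     return url, ""
-- ===== Notes on version B (the rewrite author's own statement) =====
-- stated objective: idiomatic
-- what changed: Replaces the two full find() scans plus comprehension and min() with one early-exiting forward scan that splits at the first query/hash marker.
import Mathlib
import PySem

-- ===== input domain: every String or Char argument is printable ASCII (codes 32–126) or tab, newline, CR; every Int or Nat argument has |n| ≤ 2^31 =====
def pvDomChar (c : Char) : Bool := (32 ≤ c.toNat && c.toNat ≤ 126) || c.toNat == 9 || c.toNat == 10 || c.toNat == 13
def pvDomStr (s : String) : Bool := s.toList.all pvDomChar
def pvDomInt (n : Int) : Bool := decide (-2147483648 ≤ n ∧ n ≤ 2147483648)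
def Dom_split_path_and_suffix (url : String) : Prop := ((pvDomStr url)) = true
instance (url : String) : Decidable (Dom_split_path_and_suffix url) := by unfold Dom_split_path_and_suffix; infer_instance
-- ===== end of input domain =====

-- B replaces A's two full find() scans + comprehension + min() by one early-exiting
-- forward scan (idiomatic single pass); same return value everywhere.

-- ===== PORT A =====
def split_path_and_suffix (url : String) : String × String :=
  let query_idx := PySem.Str.find url "?"
  let hash_idx := PySem.Str.find url "#"
  let indices := [query_idx, hash_idx].filter (fun i => decide (i ≠ -1))
  match PySem.List.min? indices (fun i => i) with
  | none => (url, "")          -- `if not indices: return url, ""` (min? is none exactly on [])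
  | some cut => (PySem.Str.slice url none (some cut), PySem.Str.slice url (some cut) none)

-- ===== PORT B =====
-- `for i, ch in enumerate(url): if ch == "?" or ch == "#": return url[:i], url[i:]`
def pvAltGo (url : String) (i : Nat) : List Char → String × String
  | [] => (url, "")
  | c :: cs =>
    if c = '?' ∨ c = '#' then
      (String.ofList (url.toList.take i), String.ofList (url.toList.drop i))
    else pvAltGo url (i + 1) cs

def split_path_and_suffix_alt (url : String) : String × String :=
  pvAltGo url 0 url.toList

-- ===== PRECONDITION & SPEC =====
def Spec_split_path_and_suffix (url : String) (out : String × String) : Prop := out = split_path_and_suffix_alt url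
instance (url : String) (out : String × String) : Decidable (Spec_split_path_and_suffix url out) := by unfold Spec_split_path_and_suffix; infer_instance

-- ===== CLAIM (what is proved, stated in full; the proofs are below) =====
def Claim_equal_split_path_and_suffix : Prop := ∀ (url : String), Dom_split_path_and_suffix url → Spec_split_path_and_suffix url (split_path_and_suffix url)

-- ===== LEMMAS AND PROOFS =====

def pvMark (c : Char) : Bool := c = '?' ∨ c = '#'

lemma singleton_infix_iff {a : Char} {l : List Char} : [a] <:+: l ↔ a ∈ l := by
  constructor
  · intro h
    exact (List.singleton_sublist).1 h.sublist
  · intro h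
    obtain ⟨s, t, rfl⟩ := List.append_of_mem h
    exact ⟨s, t, by simp⟩

lemma singleton_prefix_iff {a : Char} {t : List Char} : [a] <+: t ↔ t.head? = some a := by
  cases t with
  | nil => simp
  | cons b bs =>
    constructor
    · intro h
      obtain ⟨r, hr⟩ := h
      simp at hr
      simp [hr.1]
    · intro h
      simp at h
      exact ⟨bs, by simp [h]⟩

lemma singleton_prefix_drop_iff {a : Char} {l : List Char} {n : Nat} :
    [a] <+: l.drop n ↔ l[n]? = some a := by
  rw [singleton_prefix_iff, List.head?_drop]

-- B's scan computes the split at `findIdx? pvMark`.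
lemma pvAltGo_spec (url : String) : ∀ (rest : List Char) (i : Nat),
    rest = url.toList.drop i →
    pvAltGo url i rest =
      match List.findIdx? pvMark rest with
      | none => (url, "")
      | some j => (String.ofList (url.toList.take (i + j)), String.ofList (url.toList.drop (i + j))) := by
  intro rest
  induction rest with
  | nil => intro i _; simp [pvAltGo]
  | cons c cs ih =>
    intro i hrest
    by_cases hc : c = '?' ∨ c = '#'
    · simp [pvAltGo, hc, List.findIdx?_cons, pvMark]
    · have hc' : pvMark c = false := by
        simp [pvMark]
        simp only [not_or] at hc
        exact hc
      have hdrop : cs = url.toList.drop (i + 1) := by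
        have := congrArg List.tail hrest
        simpa [List.tail_drop] using this
      have := ih (i + 1) hdrop
      simp [pvAltGo, hc, List.findIdx?_cons, hc', this]
      cases h : List.findIdx? pvMark cs with
      | none => simp
      | some j =>
        simp [Nat.add_comm, Nat.add_left_comm]

lemma alt_eq (url : String) :
    split_path_and_suffix_alt url =
      match List.findIdx? pvMark url.toList with
      | none => (url, "")
      | some j => (String.ofList (url.toList.take j), String.ofList (url.toList.drop j)) := by
  have := pvAltGo_spec url url.toList 0 (by simp)
  simpa [split_path_and_suffix_alt] using this

lemma find_char_mem {a : Char} {l : List Char} (h : a ∈ l) :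
    PySem.Chars.find l [a] ≠ -1 := by
  rw [PySem.Chars.find_ne_neg_one_iff]
  exact singleton_infix_iff.2 h

lemma find_char_not_mem {a : Char} {l : List Char} (h : a ∉ l) :
    PySem.Chars.find l [a] = -1 := by
  rw [PySem.Chars.find_eq_neg_one_iff]
  exact fun hinf => h (singleton_infix_iff.1 hinf)

-- if `a` occurs at index k, find l [a] is nonneg and its toNat ≤ k, and points at an `a`
lemma find_char_le {a : Char} {l : List Char} {k : Nat} (h : l[k]? = some a) :
    0 ≤ PySem.Chars.find l [a] ∧ (PySem.Chars.find l [a]).toNat ≤ k ∧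
      l[(PySem.Chars.find l [a]).toNat]? = some a := by
  have hmem : a ∈ l := by
    have hk : k < l.length := by
      by_contra hk
      simp [List.getElem?_eq_none (Nat.le_of_not_lt hk)] at h
    exact List.mem_of_getElem? h
  have hne := find_char_mem hmem
  have hle := PySem.Chars.neg_one_le_find l [a]
  have hnonneg : 0 ≤ PySem.Chars.find l [a] := by omega
  obtain ⟨hpre, hmin⟩ := PySem.Chars.find_spec hnonneg
  refine ⟨hnonneg, ?_, singleton_prefix_drop_iff.1 hpre⟩
  by_contra hlt
  exact hmin k (by omega) (singleton_prefix_drop_iff.2 h)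

lemma toList_inj {s t : String} (h : s.toList = t.toList) : s = t := by
  have h2 := congrArg String.ofList h
  simpa using h2

lemma slice_pair_eq (url : String) (m : Int) (hm : 0 ≤ m) :
    (PySem.Str.slice url none (some m), PySem.Str.slice url (some m) none) =
      (String.ofList (url.toList.take m.toNat), String.ofList (url.toList.drop m.toNat)) := by
  refine Prod.ext ?_ ?_
  · apply toList_inj
    rw [PySem.Str.toList_slice, PySem.Chars.slice_eq_listSlice, PySem.List.slice_to _ hm]
    simp
  · apply toList_inj
    rw [PySem.Str.toList_slice, PySem.Chars.slice_eq_listSlice, PySem.List.slice_from _ hm]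
    simp

theorem main_equiv (url : String) :
    split_path_and_suffix url = split_path_and_suffix_alt url := by
  rw [alt_eq]
  unfold split_path_and_suffix
  simp only [PySem.Str.find_eq]
  have hq : ("?" : String).toList = ['?'] := rfl
  have hh : ("#" : String).toList = ['#'] := rfl
  rw [hq, hh]
  set l := url.toList with hl
  set q := PySem.Chars.find l ['?'] with hqdef
  set h := PySem.Chars.find l ['#'] with hhdef
  cases hidx : List.findIdx? pvMark l with
  | none =>
    -- no marker: both finds are -1, indices empty, min? none
    have hnall : ∀ x ∈ l, pvMark x = false := by
      intro x hx
      exact List.findIdx?_eq_none_iff.1 hidx x hx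
    have hq1 : q = -1 := by
      apply find_char_not_mem
      intro hmem
      have := hnall _ hmem
      simp [pvMark] at this
    have hh1 : h = -1 := by
      apply find_char_not_mem
      intro hmem
      have := hnall _ hmem
      simp [pvMark] at this
    simp [hq1, hh1, PySem.List.min?]
  | some k =>
    -- marker at first index k
    obtain ⟨hklen, hpk, hkmin⟩ := List.findIdx?_eq_some_iff_getElem.1 hidx
    have hpk' : pvMark l[k] = true := hpk
    have hkget : l[k]? = some l[k] := List.getElem?_eq_getElem hklen
    -- at least one find is ≠ -1, and the minimal present find equals k
    have hmark : l[k] = '?' ∨ l[k] = '#' := by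
      simpa [pvMark, decide_eq_true_eq] using hpk'
    -- helper facts for whichever marker occurs at k
    have key : ∀ m : Int, PySem.List.min? ([q, h].filter (fun i => decide (i ≠ -1))) (fun i => i) = some m →
        0 ≤ m ∧ m.toNat = k := by
      intro m hmin
      have hmem := PySem.List.min?_mem hmin
      have hminle := PySem.List.min?_isMin hmin
      have hmemf := List.mem_filter.1 hmem
      have hmne : m ≠ -1 := by simpa using hmemf.2
      have hmor : m = q ∨ m = h := by simpa using hmemf.1
      -- m is a valid find result pointing at a marker
      have hmfind : l[m.toNat]? = some '?' ∨ l[m.toNat]? = some '#' := by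
        rcases hmor with rfl | rfl
        · left
          have hnn : 0 ≤ q := by have := PySem.Chars.neg_one_le_find l ['?']; omega
          obtain ⟨hpre, _⟩ := PySem.Chars.find_spec (sub := ['?']) (by rw [← hqdef]; exact hnn)
          rw [← hqdef] at hpre
          exact singleton_prefix_drop_iff.1 hpre
        · right
          have hnn : 0 ≤ h := by have := PySem.Chars.neg_one_le_find l ['#']; omega
          obtain ⟨hpre, _⟩ := PySem.Chars.find_spec (sub := ['#']) (by rw [← hhdef]; exact hnn)
          rw [← hhdef] at hpre
          exact singleton_prefix_drop_iff.1 hpre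
      have hmnn : 0 ≤ m := by
        rcases hmor with rfl | rfl
        · have := PySem.Chars.neg_one_le_find l ['?']; rw [← hqdef] at this; omega
        · have := PySem.Chars.neg_one_le_find l ['#']; rw [← hhdef] at this; omega
      refine ⟨hmnn, ?_⟩
      -- k ≤ m.toNat : m.toNat holds a marker and k is the first marker
      have hmlt : m.toNat < l.length := by
        rcases hmfind with hf | hf <;>
          exact (List.getElem?_eq_some_iff.1 hf).1
      have hkle : k ≤ m.toNat := by
        by_contra hlt
        have hml := hkmin m.toNat (by omega)
        rcases hmfind with hf | hf <;>
        · rw [List.getElem?_eq_getElem hmlt] at hf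
          simp at hf
          simp [pvMark, hf] at hml
      -- m.toNat ≤ k : the find of the marker at k is ≤ k, and m ≤ that find
      have hmle : m.toNat ≤ k := by
        rcases hmark with hkq | hkh
        · have hfk := find_char_le (a := '?') (l := l) (k := k) (by rw [hkget, hkq])
          rw [← hqdef] at hfk
          have hqin : q ∈ [q, h].filter (fun i => decide (i ≠ -1)) := by
            have : q ≠ -1 := by omega
            simp [List.mem_filter, this]
          have := hminle q hqin
          omega
        · have hfk := find_char_le (a := '#') (l := l) (k := k) (by rw [hkget, hkh])
          rw [← hhdef] at hfk
          have hhin : h ∈ [q, h].filter (fun i => decide (i ≠ -1)) := by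
            have : h ≠ -1 := by omega
            simp [List.mem_filter, this]
          have := hminle h hhin
          omega
      omega
    -- min? is some: indices nonempty since the marker at k makes one find ≠ -1
    cases hminc : PySem.List.min? ([q, h].filter (fun i => decide (i ≠ -1))) (fun i => i) with
    | none =>
      exfalso
      have hempty := (PySem.List.min?_eq_none_iff _ _).1 hminc
      have : q = -1 ∧ h = -1 := by
        by_contra hcon
        have : q ≠ -1 ∨ h ≠ -1 := by tauto
        rcases this with hne | hne
        · have : q ∈ [q, h].filter (fun i => decide (i ≠ -1)) := by simp [List.mem_filter, hne]
          rw [hempty] at this; simp at this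
        · have : h ∈ [q, h].filter (fun i => decide (i ≠ -1)) := by simp [List.mem_filter, hne]
          rw [hempty] at this; simp at this
      rcases hmark with hkq | hkh
      · exact find_char_mem (a := '?') (List.mem_of_getElem? (by rw [hkget, hkq])) (by rw [← hqdef]; exact this.1)
      · exact find_char_mem (a := '#') (List.mem_of_getElem? (by rw [hkget, hkh])) (by rw [← hhdef]; exact this.2)
    | some m =>
      obtain ⟨hmnn, hmk⟩ := key m hminc
      simp only
      rw [slice_pair_eq url m hmnn, hmk]

-- ===== VERDICT (by name: the statement is the Claim_ definition above) =====
theorem split_path_and_suffix_spec : Claim_equal_split_path_and_suffix := by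
  intro url _
  unfold Spec_split_path_and_suffix
  exact main_equiv url
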